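-- pv_equiv track=rewrite | github.com/paulklemstine/factor | lean/demo/New/LYMInequality/demos/sauer_shelah_demo.py | vc_dimension
-- ===== SOURCE A (Python) =====
-- from itertools import combinations, product
--
-- def shatters(family, A):
--     """
--     Check if family F shatters set A.
--     F shatters A if for every subset B ⊆ A, there exists S ∈ F
--     such that A ∩ S = B.
--     """
--     A = frozenset(A)
--     # Generate all subsets of A
--     required = set()
--     for k in range(len(A) + 1):
--         for subset in combinations(A, k):
--             required.add(frozenset(subset))
--
--     # Check if each required intersection is achieved
--     achieved = set()
--     for S in family:
--         S = frozenset(S)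
--         achieved.add(A & S)
--
--     return required <= achieved
--
-- def vc_dimension(family, ground_set):
--     """
--     Compute the VC dimension of a family:
--     the largest size of a set shattered by F.
--     """
--     n = len(ground_set)
--     vc = 0
--     for k in range(n + 1):
--         found = False
--         for A in combinations(ground_set, k):
--             if shatters(family, A):
--                 found = True
--                 vc = k
--                 break
--         if not found:
--             break
--     return vc
-- ===== SOURCE B (Python) =====
-- def vc_dimension(family, ground_set):
--     fam = [frozenset(S) for S in family]
--     n = len(ground_set)
--     # one pass over all 2^n index-subsequences (bitmask encoded); a subsequence A is
--     # shattered iff the number of distinct traces {A & S} equals 2^|set(A)|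
--     sizes = set()
--     for mask in range(1 << n):
--         A = [x for i, x in enumerate(ground_set) if (mask >> i) & 1]
--         Af = frozenset(A)
--         if len({Af & S for S in fam}) == 2 ** len(Af):
--             sizes.add(len(A))
--     # the answer is the length of the longest run 1,2,...,vc contained in sizes
--     vc = 0
--     while (vc + 1) in sizes:
--         vc += 1
--     return vc
-- ===== Notes on version B (the rewrite author's own statement) =====
-- stated objective: alternative
-- what changed: B drops A's per-size combinations search and its 2^|A| required-subset enumeration inside shatters: it sweeps all subsequences once as bitmasks, tests shattering by counting distinct traces against 2^|A|, collects the shattered sizes in a set, and reads the answer off with a while-loop; the trade is that B always performs the full 2^n sweep while A's loop breaks early, so B is not faster in practice.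
import Mathlib
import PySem

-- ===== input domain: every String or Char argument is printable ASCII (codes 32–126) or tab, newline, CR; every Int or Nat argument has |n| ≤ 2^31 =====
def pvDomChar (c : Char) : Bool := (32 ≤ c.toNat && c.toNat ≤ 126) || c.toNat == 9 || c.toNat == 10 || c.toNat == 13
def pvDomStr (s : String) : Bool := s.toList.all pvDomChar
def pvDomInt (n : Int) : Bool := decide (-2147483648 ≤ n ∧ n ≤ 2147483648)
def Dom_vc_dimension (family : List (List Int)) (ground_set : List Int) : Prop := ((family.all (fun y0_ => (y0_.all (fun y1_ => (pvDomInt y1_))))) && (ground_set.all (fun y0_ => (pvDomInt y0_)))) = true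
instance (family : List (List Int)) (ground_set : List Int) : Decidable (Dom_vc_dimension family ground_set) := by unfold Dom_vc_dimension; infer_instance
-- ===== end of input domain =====

-- B replaces A's per-size combination search with shattering subsets by a single bitmask
-- sweep over all 2^n subsequences, a trace-counting shattering test (distinct traces = 2^|A|),
-- and a final while-loop over the collected sizes; objective: alternative (B always
-- performs the full 2^n sweep, it is not faster than A, whose loop breaks early).

-- ===== PORT A =====
-- itertools.combinations(xs, k): k-element subsequences in lexicographic index order.
-- Frozensets are represented as order-preserving duplicate-free lists: frozenset(xs) is
-- PySem.List.dedup xs, and A ∩ S is Ac.filter (· ∈ S); every set-of-frozensets element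
-- here is a sublist of the same duplicate-free Ac, so list equality = frozenset equality.
def combinations : List Int → Nat → List (List Int)
  | _, 0 => [[]]
  | [], _ + 1 => []
  | x :: xs, k + 1 => (combinations xs k).map (fun l => x :: l) ++ combinations xs (k + 1)

def shatters (family : List (List Int)) (A : List Int) : Bool :=
  let Ac := PySem.List.dedup A
  let required : PySem.Set (List Int) :=
    (List.range (Ac.length + 1)).foldl
      (fun req k => (combinations Ac k).foldl (fun r subset => PySem.Set.add r subset) req)
      PySem.Set.empty
  let achieved : PySem.Set (List Int) :=
    family.foldl
      (fun ach S => PySem.Set.add ach (Ac.filter (fun x => decide (x ∈ PySem.List.dedup S))))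
      PySem.Set.empty
  PySem.Set.issubset required achieved

-- the 'for k in range(n+1)' loop with its two breaks: found = any shattered A of size k
def vcLoop (family : List (List Int)) (ground_set : List Int) : List Nat → Int → Int
  | [], vc => vc
  | k :: ks, vc =>
    if (combinations ground_set k).any (fun A => shatters family A) then
      vcLoop family ground_set ks (k : Int)
    else vc

def vc_dimension (family : List (List Int)) (ground_set : List Int) : Int :=
  vcLoop family ground_set (List.range (ground_set.length + 1)) 0

-- ===== PORT B =====
-- Source B: [x for i, x in enumerate(ground_set) if (mask >> i) & 1]
def maskSubseq (ground_set : List Int) (mask : Nat) : List Int :=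
  (PySem.List.enumerate ground_set).filterMap
    (fun p => if ((mask >>> p.1.toNat) &&& 1) == 1 then some p.2 else none)

-- Source B: len({Af & S for S in fam})
def traceCount (fam : List (List Int)) (Af : List Int) : Nat :=
  (fam.foldl (fun tr S => PySem.Set.add tr (Af.filter (fun x => decide (x ∈ S))))
    PySem.Set.empty).length

-- Source B: 'while (vc + 1) in sizes: vc += 1' — fuel n suffices (sizes ⊆ {0,…,n})
def whileLoop (sizes : PySem.Set Int) : Nat → Int → Int
  | 0, vc => vc
  | f + 1, vc => if PySem.Set.contains sizes (vc + 1) then whileLoop sizes f (vc + 1) else vc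

def vc_dimension_alt (family : List (List Int)) (ground_set : List Int) : Int :=
  let fam := family.map (fun S => PySem.List.dedup S)
  let n := ground_set.length
  let sizes : PySem.Set Int :=
    (List.range (2 ^ n)).foldl
      (fun sz mask =>
        let A := maskSubseq ground_set mask
        let Af := PySem.List.dedup A
        if traceCount fam Af == 2 ^ Af.length then PySem.Set.add sz (A.length : Int) else sz)
      PySem.Set.empty
  whileLoop sizes n 0

-- ===== PRECONDITION & SPEC =====
def Spec_vc_dimension (family : List (List Int)) (ground_set : List Int) (out : Int) : Prop := out = vc_dimension_alt family ground_set
instance (family : List (List Int)) (ground_set : List Int) (out : Int) : Decidable (Spec_vc_dimension family ground_set out) := by unfold Spec_vc_dimension; infer_instance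

-- ===== CLAIM (what is proved, stated in full; the proofs are below) =====
def Claim_equal_vc_dimension : Prop := ∀ (family : List (List Int)) (ground_set : List Int), Dom_vc_dimension family ground_set → Spec_vc_dimension family ground_set (vc_dimension family ground_set)

-- ===== LEMMAS AND PROOFS =====

-- membership in B's conditional size-collecting fold
theorem mem_foldl_add_if {β : Type} (p : β → Bool) (g : β → Int) (ys : List β)
    (s : PySem.Set Int) (x : Int) :
    x ∈ ys.foldl (fun r b => if p b then PySem.Set.add r (g b) else r) s ↔
      x ∈ s ∨ ∃ b ∈ ys, p b = true ∧ x = g b := by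
  induction ys generalizing s with
  | nil => simp
  | cons y ys ih =>
      simp only [List.foldl_cons]
      rw [ih]
      by_cases hp : p y = true
      · simp only [hp, if_true, PySem.Set.mem_add, List.mem_cons]
        constructor
        · rintro (⟨h | rfl⟩ | ⟨b, hb, hpb, rfl⟩)
          · exact Or.inl h
          · exact Or.inr ⟨y, Or.inl rfl, hp, rfl⟩
          · exact Or.inr ⟨b, Or.inr hb, hpb, rfl⟩
        · rintro (h | ⟨b, (rfl | hb), hpb, rfl⟩)
          · exact Or.inl (Or.inl h)
          · exact Or.inl (Or.inr rfl)
          · exact Or.inr ⟨b, hb, hpb, rfl⟩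
      · simp only [hp, List.mem_cons]
        constructor
        · rintro (h | ⟨b, hb, hpb, rfl⟩)
          · exact Or.inl h
          · exact Or.inr ⟨b, Or.inr hb, hpb, rfl⟩
        · rintro (h | ⟨b, (rfl | hb), hpb, rfl⟩)
          · exact Or.inl h
          · exact absurd hpb hp
          · exact Or.inr ⟨b, hb, hpb, rfl⟩

theorem mem_combinations : ∀ (xs : List Int) (k : Nat) (l : List Int),
    l ∈ combinations xs k ↔ l.Sublist xs ∧ l.length = k := by
  intro xs
  induction xs with
  | nil =>
      intro k l
      cases k with
      | zero =>
          simp only [combinations, List.mem_singleton, List.sublist_nil]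
          constructor
          · rintro rfl; exact ⟨rfl, rfl⟩
          · rintro ⟨rfl, _⟩; rfl
      | succ k =>
          simp only [combinations, List.not_mem_nil, false_iff, not_and]
          intro h
          rw [List.sublist_nil.mp h]
          simp
  | cons x xs ih =>
      intro k l
      cases k with
      | zero =>
          simp only [combinations, List.mem_singleton]
          constructor
          · rintro rfl; exact ⟨List.nil_sublist _, rfl⟩
          · rintro ⟨_, hl⟩; exact List.length_eq_zero_iff.mp hl
      | succ k =>
          simp only [combinations, List.mem_append, List.mem_map, ih,
            List.sublist_cons_iff]
          constructor
          · rintro (⟨r, ⟨hr, hlen⟩, rfl⟩ | ⟨hs, hlen⟩)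
            · exact ⟨Or.inr ⟨r, rfl, hr⟩, by simp [hlen]⟩
            · exact ⟨Or.inl hs, hlen⟩
          · rintro ⟨hs | ⟨r, rfl, hr⟩, hlen⟩
            · exact Or.inr ⟨hs, hlen⟩
            · exact Or.inl ⟨r, ⟨hr, by simpa using hlen⟩, rfl⟩

theorem mem_req_fold (Ac : List Int) (ks : List Nat) (s : PySem.Set (List Int)) (x : List Int) :
    x ∈ ks.foldl (fun req k => (combinations Ac k).foldl (fun r subset => PySem.Set.add r subset) req) s
      ↔ x ∈ s ∨ ∃ k ∈ ks, x ∈ combinations Ac k := by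
  induction ks generalizing s with
  | nil => simp
  | cons k ks ih =>
      simp only [List.foldl_cons, ih, List.mem_cons]
      have hin : x ∈ (combinations Ac k).foldl (fun r subset => PySem.Set.add r subset) s ↔
          x ∈ s ∨ ∃ b ∈ combinations Ac k, x = b := by
        simpa using PySem.Set.mem_foldl_add (combinations Ac k) (fun c : List Int => c) s x
      rw [hin]
      constructor
      · rintro (⟨h | ⟨b, hb, rfl⟩⟩ | ⟨k', hk', hx⟩)
        · exact Or.inl h
        · exact Or.inr ⟨k, Or.inl rfl, hb⟩
        · exact Or.inr ⟨k', Or.inr hk', hx⟩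
      · rintro (h | ⟨k', (rfl | hk'), hx⟩)
        · exact Or.inl (Or.inl h)
        · exact Or.inl (Or.inr ⟨x, hx, rfl⟩)
        · exact Or.inr ⟨k', hk', hx⟩

theorem nodup_req_fold (Ac : List Int) (ks : List Nat) (s : PySem.Set (List Int)) (hs : s.Nodup) :
    (ks.foldl (fun req k => (combinations Ac k).foldl (fun r subset => PySem.Set.add r subset) req) s).Nodup := by
  induction ks generalizing s with
  | nil => exact hs
  | cons k ks ih =>
      simp only [List.foldl_cons]
      refine ih _ ?_
      have h2 : (combinations Ac k).foldl (fun r subset => PySem.Set.add r subset) s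
          = PySem.Set.update s (combinations Ac k) := by
        have h3 := PySem.Set.update_map_eq_foldl_add (combinations Ac k)
          (fun c : List Int => c) s
        simpa using h3.symm
      rw [h2]
      exact PySem.Set.nodup_update _ _ hs

-- A's shatters equals B's trace-counting test
theorem shatters_eq_count (family : List (List Int)) (A : List Int) :
    shatters family A =
      (traceCount (family.map (fun S => PySem.List.dedup S)) (PySem.List.dedup A)
        == 2 ^ (PySem.List.dedup A).length) := by
  unfold shatters traceCount
  simp only [List.foldl_map]
  set Ac := PySem.List.dedup A with hAcdef
  have hAnd : Ac.Nodup := PySem.List.nodup_dedup A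
  set f : PySem.Set (List Int) → List Int → PySem.Set (List Int) :=
    fun ach S => PySem.Set.add ach (Ac.filter (fun x => decide (x ∈ PySem.List.dedup S))) with hf
  set achieved := family.foldl f PySem.Set.empty with hach
  set required := (List.range (Ac.length + 1)).foldl
      (fun req k => (combinations Ac k).foldl (fun r subset => PySem.Set.add r subset) req)
      PySem.Set.empty with hreq
  have hreq_mem : ∀ l, l ∈ required ↔ l.Sublist Ac := by
    intro l
    rw [hreq, mem_req_fold]
    simp only [PySem.Set.empty, List.not_mem_nil, false_or, List.mem_range, mem_combinations]
    constructor
    · rintro ⟨k, _, hs, _⟩; exact hs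
    · intro hs
      exact ⟨l.length, Nat.lt_succ_of_le hs.length_le, hs, rfl⟩
  have hreq_nodup : required.Nodup := nodup_req_fold _ _ _ (by simp [PySem.Set.empty])
  have hreq_perm : required.Perm Ac.sublists := by
    refine (List.perm_ext_iff_of_nodup hreq_nodup ((List.nodup_sublists).2 hAnd)).2 ?_
    intro x; rw [hreq_mem, List.mem_sublists]
  have hreq_len : required.length = 2 ^ Ac.length :=
    hreq_perm.length_eq.trans (List.length_sublists _)
  have hach_nodup : achieved.Nodup := by
    rw [hach, hf,
      ← PySem.Set.update_map_eq_foldl_add family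
        (fun S => Ac.filter (fun x => decide (x ∈ PySem.List.dedup S))) PySem.Set.empty]
    exact PySem.Set.nodup_update _ _ (by simp [PySem.Set.empty])
  have hach_mem : ∀ l ∈ achieved, l.Sublist Ac := by
    intro l hl
    rw [hach, hf] at hl
    rcases (PySem.Set.mem_foldl_add family _ PySem.Set.empty l).1 hl with h | ⟨S, _, rfl⟩
    · simp [PySem.Set.empty] at h
    · exact List.filter_sublist
  rw [Bool.eq_iff_iff, PySem.Set.issubset_iff, beq_iff_eq]
  constructor
  · intro h
    have : achieved.Perm required := by
      refine (List.perm_ext_iff_of_nodup hach_nodup hreq_nodup).2 ?_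
      intro x
      exact ⟨fun hx => (hreq_mem x).2 (hach_mem x hx), fun hx => h x hx⟩
    rw [this.length_eq, hreq_len]
  · intro hlen l hl
    have hsubF : achieved.toFinset ⊆ Ac.sublists.toFinset := by
      intro x hx
      rw [List.mem_toFinset] at hx ⊢
      exact List.mem_sublists.2 (hach_mem x hx)
    have hcard : Ac.sublists.toFinset.card ≤ achieved.toFinset.card := by
      rw [List.toFinset_card_of_nodup hach_nodup,
        List.toFinset_card_of_nodup ((List.nodup_sublists).2 hAnd),
        List.length_sublists, hlen]
    have heq := Finset.eq_of_subset_of_card_le hsubF hcard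
    have hmemF : l ∈ Ac.sublists.toFinset := by
      rw [List.mem_toFinset, List.mem_sublists]
      exact (hreq_mem l).1 hl
    rw [← heq, List.mem_toFinset] at hmemF
    exact hmemF

-- decoding a bitmask: structural recursion view
theorem maskSubseq_shift (xs : List Int) : ∀ (s mask : Nat),
    (PySem.List.enumerate xs (s : Int)).filterMap
      (fun p => if ((mask >>> p.1.toNat) &&& 1) == 1 then some p.2 else none)
    = maskSubseq xs (mask >>> s) := by
  induction xs with
  | nil => intro s mask; simp [maskSubseq, PySem.List.enumerate_nil]
  | cons y ys ih =>
      intro s mask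
      have h1 : ((s : Int) + 1) = ((s + 1 : Nat) : Int) := by push_cast; ring
      rw [maskSubseq, PySem.List.enumerate_cons, PySem.List.enumerate_cons]
      simp only [List.filterMap_cons]
      have h0 : ((0 : Int) + 1) = ((1 : Nat) : Int) := by norm_num
      rw [h1, ih (s + 1) mask, h0, ih 1 (mask >>> s)]
      have hsh : mask >>> (s + 1) = (mask >>> s) >>> 1 := by
        rw [Nat.shiftRight_add]
      have htop : (mask >>> (s : Int).toNat) = mask >>> s := by norm_num
      have htop0 : ((mask >>> s) >>> (0 : Int).toNat) = mask >>> s := by norm_num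
      rw [hsh, htop, htop0]

theorem maskSubseq_cons (x : Int) (xs : List Int) (mask : Nat) :
    maskSubseq (x :: xs) mask =
      (if (mask &&& 1) == 1 then [x] else []) ++ maskSubseq xs (mask >>> 1) := by
  rw [maskSubseq, PySem.List.enumerate_cons]
  simp only [List.filterMap_cons]
  have h0 : ((0 : Int) + 1) = ((1 : Nat) : Int) := by norm_num
  rw [h0, maskSubseq_shift xs 1 mask]
  have htop : (mask >>> (0 : Int).toNat) = mask := by norm_num
  rw [htop]
  by_cases h : mask % 2 = 1
  · simp [Nat.and_one_is_mod, h]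
  · simp [Nat.and_one_is_mod, h]

-- the masks below 2^n decode to exactly the subsequences of ground_set
theorem sublist_iff_mask : ∀ (xs : List Int) (l : List Int),
    l.Sublist xs ↔ ∃ mask, mask < 2 ^ xs.length ∧ maskSubseq xs mask = l := by
  intro xs
  induction xs with
  | nil =>
      intro l
      constructor
      · intro h
        refine ⟨0, by norm_num, ?_⟩
        rw [List.sublist_nil.mp h]; rfl
      · rintro ⟨mask, _, rfl⟩
        simp [maskSubseq, PySem.List.enumerate_nil]
  | cons x xs ih =>
      intro l
      have hp : 2 ^ (x :: xs).length = 2 ^ xs.length * 2 := by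
        simp [List.length_cons, pow_succ]
      constructor
      · intro h
        rcases List.sublist_cons_iff.mp h with hs | ⟨r, rfl, hr⟩
        · rcases (ih l).mp hs with ⟨m, hm, hdec⟩
          refine ⟨2 * m, by omega, ?_⟩
          rw [maskSubseq_cons]
          have hb : ((2 * m) &&& 1) = 0 := by
            rw [Nat.and_one_is_mod]; omega
          have hsh : (2 * m) >>> 1 = m := by
            rw [Nat.shiftRight_one]; omega
          simp [hb, hsh, hdec]
        · rcases (ih r).mp hr with ⟨m, hm, hdec⟩
          refine ⟨2 * m + 1, by omega, ?_⟩
          rw [maskSubseq_cons]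
          have hb : ((2 * m + 1) &&& 1) = 1 := by
            rw [Nat.and_one_is_mod]; omega
          have hsh : (2 * m + 1) >>> 1 = m := by
            rw [Nat.shiftRight_one]; omega
          simp [hb, hsh, hdec]
      · rintro ⟨mask, hm, rfl⟩
        rw [maskSubseq_cons]
        have hm2 : mask >>> 1 < 2 ^ xs.length := by
          rw [Nat.shiftRight_one]; omega
        have hsub : (maskSubseq xs (mask >>> 1)).Sublist xs :=
          (ih _).mpr ⟨mask >>> 1, hm2, rfl⟩
        by_cases hb : mask % 2 = 1
        · simpa [Nat.and_one_is_mod, hb] using (List.cons_sublist_cons (a := x)).mpr hsub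
        · simpa [Nat.and_one_is_mod, hb] using hsub.trans (List.sublist_cons_self x xs)

-- shatters family [] is exactly "family nonempty"
theorem shatters_nil_ne (family : List (List Int)) (hne : family ≠ []) :
    shatters family [] = true := by
  have hrw : shatters family [] = PySem.Set.issubset [[]]
      (family.foldl (fun ach S => PySem.Set.add ach
        (List.filter (fun x => decide (x ∈ PySem.List.dedup S)) [])) PySem.Set.empty) := rfl
  rw [hrw, PySem.Set.issubset_iff]
  intro x hx
  have hx' : x = [] := by simpa using hx
  subst hx'
  rcases List.exists_cons_of_ne_nil hne with ⟨S, rest, rfl⟩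
  exact (PySem.Set.mem_foldl_add (S :: rest) (fun _ : List Int => ([] : List Int))
    PySem.Set.empty ([] : List Int)).2 (Or.inr ⟨S, List.mem_cons_self, rfl⟩)

theorem shatters_empty_family (A : List Int) : shatters [] A = false := by
  unfold shatters
  simp only [List.foldl_nil]
  rw [Bool.eq_false_iff]
  intro hsub
  rw [PySem.Set.issubset_iff] at hsub
  have hmem : ([] : List Int) ∈ (List.range ((PySem.List.dedup A).length + 1)).foldl
      (fun req k => (combinations (PySem.List.dedup A) k).foldl
        (fun r subset => PySem.Set.add r subset) req) PySem.Set.empty := by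
    rw [mem_req_fold]
    exact Or.inr ⟨0, by simp, by simp [combinations]⟩
  have := hsub _ hmem
  simp [PySem.Set.empty] at this

-- the loops: A's break-loop over k = v+1, …, v+m agrees with B's fuelled while-loop
theorem loops_agree (family : List (List Int)) (ground_set : List Int) (sizes : PySem.Set Int)
    (hmem : ∀ k : Nat, PySem.Set.contains sizes (k : Int)
      = (combinations ground_set k).any (fun A => shatters family A)) :
    ∀ (m v fuel : Nat), m ≤ fuel →
      (∀ k : Nat, v + m < k → (combinations ground_set k).any (fun A => shatters family A) = false) →
      vcLoop family ground_set (List.range' (v + 1) m) (v : Int) = whileLoop sizes fuel (v : Int) := by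
  intro m
  induction m with
  | zero =>
      intro v fuel _ hbound
      cases fuel with
      | zero => rfl
      | succ f =>
          rw [whileLoop]
          have hc : ((v : Int) + 1) = ((v + 1 : Nat) : Int) := by push_cast; ring
          rw [hc, hmem (v + 1), hbound (v + 1) (by omega)]
          simp [List.range', vcLoop]
  | succ m ih =>
      intro v fuel hfuel hbound
      cases fuel with
      | zero => omega
      | succ f =>
          rw [List.range'_succ, vcLoop, whileLoop]
          have hc : ((v : Int) + 1) = ((v + 1 : Nat) : Int) := by push_cast; ring
          rw [hc, hmem (v + 1)]
          by_cases hP : (combinations ground_set (v + 1)).any (fun A => shatters family A)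
          · rw [if_pos hP, if_pos hP]
            exact ih (v + 1) f (by omega) (fun k hk => hbound k (by omega))
          · rw [if_neg hP, if_neg hP]

-- the whole of B, written with the size-collecting fold beta-reduced (defeq to vc_dimension_alt)
theorem main_eq (family : List (List Int)) (ground_set : List Int) :
    vcLoop family ground_set (List.range (ground_set.length + 1)) 0
      = whileLoop
          ((List.range (2 ^ ground_set.length)).foldl
            (fun sz mask =>
              if traceCount (family.map (fun S => PySem.List.dedup S))
                    (PySem.List.dedup (maskSubseq ground_set mask))
                  == 2 ^ (PySem.List.dedup (maskSubseq ground_set mask)).length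
              then PySem.Set.add sz ((maskSubseq ground_set mask).length : Int) else sz)
            PySem.Set.empty)
          ground_set.length 0 := by
  set fam := family.map (fun S => PySem.List.dedup S) with hfam
  set sizes := (List.range (2 ^ ground_set.length)).foldl
      (fun sz mask =>
        if traceCount fam (PySem.List.dedup (maskSubseq ground_set mask))
            == 2 ^ (PySem.List.dedup (maskSubseq ground_set mask)).length
        then PySem.Set.add sz ((maskSubseq ground_set mask).length : Int) else sz)
      PySem.Set.empty with hsizes
  have hmemsz : ∀ x : Int, x ∈ sizes ↔
      ∃ mask ∈ List.range (2 ^ ground_set.length),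
        (traceCount fam (PySem.List.dedup (maskSubseq ground_set mask))
          == 2 ^ (PySem.List.dedup (maskSubseq ground_set mask)).length) = true ∧
        x = ((maskSubseq ground_set mask).length : Int) := by
    intro x
    have h := mem_foldl_add_if
      (fun mask => traceCount fam (PySem.List.dedup (maskSubseq ground_set mask))
        == 2 ^ (PySem.List.dedup (maskSubseq ground_set mask)).length)
      (fun mask => ((maskSubseq ground_set mask).length : Int))
      (List.range (2 ^ ground_set.length)) PySem.Set.empty x
    simp only [PySem.Set.empty, List.not_mem_nil, false_or] at h
    exact h
  have hmem : ∀ k : Nat, PySem.Set.contains sizes (k : Int)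
      = (combinations ground_set k).any (fun A => shatters family A) := by
    intro k
    rw [Bool.eq_iff_iff, PySem.Set.contains_iff, List.any_eq_true]
    constructor
    · intro h
      rcases (hmemsz _).1 h with ⟨mask, hmask, htest, hlen⟩
      have hmlt : mask < 2 ^ ground_set.length := List.mem_range.1 hmask
      have hsubl : (maskSubseq ground_set mask).Sublist ground_set :=
        (sublist_iff_mask _ _).2 ⟨mask, hmlt, rfl⟩
      refine ⟨maskSubseq ground_set mask, (mem_combinations _ _ _).2 ⟨hsubl, ?_⟩, ?_⟩
      · exact_mod_cast hlen.symm
      · rw [shatters_eq_count, ← hfam]; exact htest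
    · rintro ⟨A, hAmem, hsh⟩
      rcases (mem_combinations _ _ _).1 hAmem with ⟨hsub, hlen⟩
      rcases (sublist_iff_mask _ _).1 hsub with ⟨mask, hmlt, hdec⟩
      refine (hmemsz _).2 ⟨mask, List.mem_range.2 hmlt, ?_, ?_⟩
      · rw [hdec, hfam, ← shatters_eq_count]; exact hsh
      · rw [hdec, hlen]
  have hbound : ∀ k : Nat, ground_set.length < k →
      (combinations ground_set k).any (fun A => shatters family A) = false := by
    intro k hk
    rcases Bool.eq_false_or_eq_true ((combinations ground_set k).any fun A => shatters family A)
      with h | h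
    case inr => exact h
    · exfalso
      rw [List.any_eq_true] at h
      rcases h with ⟨A, hAmem, _⟩
      rcases (mem_combinations _ _ _).1 hAmem with ⟨hsub, hlen⟩
      have := hsub.length_le
      omega
  rw [List.range_eq_range', List.range'_succ]
  by_cases hP0 : (combinations ground_set 0).any (fun A => shatters family A) = true
  · rw [vcLoop, if_pos hP0]
    have h := loops_agree family ground_set sizes hmem ground_set.length 0 ground_set.length
      le_rfl (fun k hk => hbound k (by omega))
    simpa using h
  · rw [Bool.not_eq_true] at hP0
    rw [vcLoop, if_neg (by simp [hP0])]
    have hcomb0 : combinations ground_set 0 = [[]] := by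
      cases ground_set <;> rfl
    have hshnil : shatters family [] = false := by
      have h0 : (combinations ground_set 0).any (fun A => shatters family A)
          = shatters family [] := by
        rw [hcomb0]; simp
      rw [← h0]; exact hP0
    have hfamnil : family = [] := by
      by_contra hne
      rw [shatters_nil_ne family hne] at hshnil
      simp at hshnil
    have hc1 : PySem.Set.contains sizes ((0 : Int) + 1) = false := by
      have h0 : ((0 : Int) + 1) = ((1 : Nat) : Int) := by norm_num
      rw [h0, hmem 1]
      subst hfamnil
      simp [shatters_empty_family]
    cases hn : ground_set.length with
    | zero => rfl
    | succ m =>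
        rw [whileLoop, hc1]
        simp

-- ===== VERDICT (by name: the statement is the Claim_ definition above) =====
theorem vc_dimension_spec : Claim_equal_vc_dimension := by
  intro family ground_set _
  unfold Spec_vc_dimension vc_dimension vc_dimension_alt
  exact main_eq family ground_set
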